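-- pv_equiv track=rewrite | github.com/lovelyyoshino/CSR_GLM | tools/file_split.py | text_divide_as_html_paragraph
-- ===== SOURCE A (Python) =====
-- def text_divide_as_html_paragraph(text: str):
--     if '```' in text:  # 如果文本中拥有代码，则直接返回文本
--         return text
--     else:
--         # wtf input
--         lines = text.split("\n")  # 否则对每一行拆分
--         for i, line in enumerate(lines):  # 将所有的line完成替换，变为html的段落标签
--             lines[i] = lines[i].replace(" ", "&nbsp;")  # 将空格替换为&nbsp;
--         text = "</br>".join(lines)  # 在最后加上</br>标签
--         return text
-- ===== SOURCE B (Python) =====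
-- def text_divide_as_html_paragraph(text: str):
--     if '```' in text:  # code block: return unchanged, same guard as A
--         return text
--     # two chained whole-string replacements; no line list is built
--     return text.replace(" ", "&nbsp;").replace("\n", "</br>")
-- ===== Notes on version B (the rewrite author's own statement) =====
-- stated objective: simpler
-- what changed: Replaces A's split-on-newline / per-line replace loop / join machinery with two chained whole-string replacements (space->&nbsp; then newline-></br>), building no intermediate list of lines.
import Mathlib
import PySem

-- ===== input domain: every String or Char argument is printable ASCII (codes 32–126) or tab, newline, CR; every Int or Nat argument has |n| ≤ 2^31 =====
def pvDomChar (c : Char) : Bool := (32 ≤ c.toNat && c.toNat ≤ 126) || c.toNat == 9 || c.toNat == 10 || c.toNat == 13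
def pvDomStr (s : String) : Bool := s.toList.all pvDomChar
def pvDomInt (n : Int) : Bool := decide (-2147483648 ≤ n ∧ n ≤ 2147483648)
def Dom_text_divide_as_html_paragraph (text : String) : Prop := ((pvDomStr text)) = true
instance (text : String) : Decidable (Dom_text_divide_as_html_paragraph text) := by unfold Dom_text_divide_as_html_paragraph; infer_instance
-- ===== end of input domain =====

-- B replaces A's split/per-line-replace/join machinery with two chained whole-string
-- replacements (space -> "&nbsp;", then "\n" -> "</br>"); simpler, same results.


-- ===== PORT A =====
-- the separator "\n" is a nonempty literal, so split? is always `some`; .getD [] is never taken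
def text_divide_as_html_paragraph (text : String) : String :=
  if PySem.Str.isIn "```" text then
    text
  else
    let lines := (PySem.Str.split? text "\n").getD []
    -- for i, line in enumerate(lines): lines[i] = lines[i].replace(" ", "&nbsp;")
    let lines := (PySem.List.enumerate lines).foldl
      (fun ls p => PySem.List.pySetD ls p.1
        (PySem.Str.replace (PySem.List.pyGetD ls p.1 "") " " "&nbsp;")) lines
    PySem.Str.join "</br>" lines

-- ===== PORT B =====
def text_divide_as_html_paragraph_alt (text : String) : String :=
  if PySem.Str.isIn "```" text then
    text
  else
    PySem.Str.replace (PySem.Str.replace text " " "&nbsp;") "\n" "</br>"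

-- ===== PRECONDITION & SPEC =====
def Spec_text_divide_as_html_paragraph (text : String) (out : String) : Prop := out = text_divide_as_html_paragraph_alt text
instance (text : String) (out : String) : Decidable (Spec_text_divide_as_html_paragraph text out) := by unfold Spec_text_divide_as_html_paragraph; infer_instance

-- ===== CLAIM (what is proved, stated in full; the proofs are below) =====
def Claim_equal_text_divide_as_html_paragraph : Prop := ∀ (text : String), Dom_text_divide_as_html_paragraph text → Spec_text_divide_as_html_paragraph text (text_divide_as_html_paragraph text)

-- ===== LEMMAS AND PROOFS =====

-- single-character replace is a flatMap
lemma replace_go_single (a : Char) (new : List Char) :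
    ∀ (l : List Char) (fuel : Nat) (acc : List Char), l.length ≤ fuel →
      PySem.Chars.replace.go [a] new fuel l acc
        = acc.reverse ++ l.flatMap (fun c => if c = a then new else [c]) := by
  intro l
  induction l with
  | nil =>
    intro fuel acc _
    cases fuel <;> simp [PySem.Chars.replace.go]
  | cons c t ih =>
    intro fuel acc h
    cases fuel with
    | zero => simp at h
    | succ fuel =>
      rw [PySem.Chars.replace.go.eq_def]
      simp only []
      by_cases hc : c = a
      · subst hc
        rw [if_pos (by simp)]
        simp only [List.length_cons, List.length_nil, List.drop_succ_cons, List.drop_zero]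
        rw [ih fuel (new.reverse ++ acc) (by simp at h; omega)]
        simp
      · rw [if_neg (by simp; exact fun h' => hc h'.symm)]
        rw [ih fuel (c :: acc) (by simp at h; omega)]
        simp [hc]

lemma replace_single (s : List Char) (a : Char) (new : List Char) :
    PySem.Chars.replace s [a] new = s.flatMap (fun c => if c = a then new else [c]) := by
  rw [PySem.Chars.replace]
  simp only [List.isEmpty_cons, if_neg, Bool.false_eq_true, not_false_eq_true]
  exact replace_go_single a new s s.length [] le_rfl

-- single-character split is List.splitOnP
lemma splitOn_go_single (a : Char) :
    ∀ (l : List Char) (fuel : Nat) (cur : List Char) (acc : List (List Char)),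
      l.length < fuel →
      PySem.Chars.splitOn.go [a] fuel l cur acc
        = acc.reverse ++ (List.splitOnP (· == a) l).modifyHead (cur.reverse ++ ·) := by
  intro l
  induction l with
  | nil =>
    intro fuel cur acc h
    cases fuel with
    | zero => simp at h
    | succ fuel => simp [PySem.Chars.splitOn.go, List.splitOnP_nil]
  | cons c t ih =>
    intro fuel cur acc h
    cases fuel with
    | zero => simp at h
    | succ fuel =>
      rw [PySem.Chars.splitOn.go.eq_def]
      simp only []
      by_cases hc : c = a
      · subst hc
        rw [if_pos (by simp)]
        simp only [List.length_cons, List.length_nil, List.drop_succ_cons, List.drop_zero]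
        rw [ih fuel [] (cur.reverse :: acc) (by simp at h; omega)]
        rcases hsp : List.splitOnP (· == c) t with _ | ⟨m, M⟩
        · exact absurd hsp (List.splitOnP_ne_nil _ _)
        · simp [List.splitOnP_cons, hsp]
      · rw [if_neg (by simp; exact fun h' => hc h'.symm)]
        rw [ih fuel (c :: cur) acc (by simp at h; omega)]
        rcases hsp : List.splitOnP (· == a) t with _ | ⟨m, M⟩
        · exact absurd hsp (List.splitOnP_ne_nil _ _)
        · simp [List.splitOnP_cons, hc, hsp]

lemma splitOn_single (s : List Char) (a : Char) :
    PySem.Chars.splitOn s [a] = List.splitOnP (· == a) s := by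
  rw [PySem.Chars.splitOn]
  rw [splitOn_go_single a s (s.length + 1) [] [] (Nat.lt_succ_self _)]
  rcases hsp : List.splitOnP (· == a) s with _ | ⟨m, M⟩
  · exact absurd hsp (List.splitOnP_ne_nil _ _)
  · simp

-- intercalate over a cons absorbs a prefix of the head
lemma intercalate_cons_append (sep p x : List Char) (xs : List (List Char)) :
    sep.intercalate ((p ++ x) :: xs) = p ++ sep.intercalate (x :: xs) := by
  cases xs <;> simp [List.intercalate, List.intersperse]

-- join of the per-line replacements over the single-char split = one combined flatMap
lemma join_split_eq_flatMap (sep : List Char) (a : Char) (g : Char → List Char) :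
    ∀ s : List Char,
      sep.intercalate ((List.splitOnP (· == a) s).map (·.flatMap g))
        = s.flatMap (fun c => if c = a then sep else g c) := by
  intro s
  induction s with
  | nil => simp [List.splitOnP_nil, List.intercalate]
  | cons c t ih =>
    rcases hsp : List.splitOnP (· == a) t with _ | ⟨m, M⟩
    · exact absurd hsp (List.splitOnP_ne_nil _ _)
    · by_cases hc : c = a
      · subst hc
        simp only [List.splitOnP_cons, beq_self_eq_true, if_pos, List.flatMap_cons]
        rw [hsp]
        simp only [List.map_cons, List.flatMap_nil]
        have hstep : sep.intercalate ([] :: (m.flatMap g) :: M.map (·.flatMap g))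
            = sep ++ sep.intercalate ((m.flatMap g) :: M.map (·.flatMap g)) := by
          simp [List.intercalate, List.intersperse]
        rw [hstep, ← List.map_cons, ← hsp, ih]
      · have hca : (c == a) = false := by simp [hc]
        simp only [List.splitOnP_cons, hca, Bool.false_eq_true, if_false, List.flatMap_cons]
        rw [hsp]
        simp only [List.modifyHead_cons, List.map_cons]
        rw [show (c :: m).flatMap g = g c ++ m.flatMap g from by simp]
        rw [intercalate_cons_append, ← List.map_cons, ← hsp, ih]
        simp [hc]

-- composing two flatMap replacements
lemma flatMap_compose (s : List Char) (g h : Char → List Char) :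
    (s.flatMap g).flatMap h = s.flatMap (fun c => (g c).flatMap h) := by
  induction s with
  | nil => rfl
  | cons c t ih => simp [List.flatMap_cons, ih]

-- A's index-assignment loop over enumerate is a map
lemma enumerate_set_loop (f : String → String) :
    ∀ (xs ys : List String),
      (PySem.List.enumerate xs (ys.length : Int)).foldl
        (fun ls p => PySem.List.pySetD ls p.1 (f (PySem.List.pyGetD ls p.1 ""))) (ys ++ xs)
        = ys ++ xs.map f := by
  intro xs
  induction xs with
  | nil => intro ys; simp [PySem.List.enumerate]
  | cons x t ih =>
    intro ys
    rw [PySem.List.enumerate_cons]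
    simp only [List.foldl_cons]
    have hget : PySem.List.pyGetD (ys ++ x :: t) (ys.length : Int) "" = x := by
      simp [List.getD]
    have hset : PySem.List.pySetD (ys ++ x :: t) (ys.length : Int) (f x)
        = (ys ++ [f x]) ++ t := by
      simp
    rw [hget, hset]
    have hlen : ((ys.length : Int) + 1) = (((ys ++ [f x]).length : Nat) : Int) := by
      simp
    rw [hlen, ih (ys ++ [f x])]
    simp

lemma enumerate_set_loop0 (f : String → String) (xs : List String) :
    (PySem.List.enumerate xs).foldl
      (fun ls p => PySem.List.pySetD ls p.1 (f (PySem.List.pyGetD ls p.1 ""))) xs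
      = xs.map f := by
  simpa using enumerate_set_loop f xs []

-- ===== VERDICT (by name: the statement is the Claim_ definition above) =====
theorem text_divide_as_html_paragraph_spec : Claim_equal_text_divide_as_html_paragraph := by
  intro text _
  unfold Spec_text_divide_as_html_paragraph
  unfold text_divide_as_html_paragraph text_divide_as_html_paragraph_alt
  by_cases h : PySem.Str.isIn "```" text
  · rw [if_pos h, if_pos h]
  · rw [if_neg h, if_neg h]
    rw [← String.toList_inj]
    have hsplit : PySem.Str.split? text "\n"
        = some ((PySem.Chars.splitOn text.toList ['\n']).map String.ofList) := by
      rw [PySem.Str.split?, PySem.Chars.split?, if_neg (by decide)]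
      rfl
    rw [hsplit]
    simp only [Option.getD_some]
    rw [enumerate_set_loop0 (fun l => PySem.Str.replace l " " "&nbsp;")]
    rw [PySem.Str.toList_join, PySem.Str.toList_replace, PySem.Str.toList_replace]
    simp only [List.map_map]
    have hmap : ((PySem.Chars.splitOn text.toList ['\n']).map
          (String.toList ∘ (fun l => PySem.Str.replace l " " "&nbsp;") ∘ String.ofList))
        = (PySem.Chars.splitOn text.toList ['\n']).map
            (fun cs => PySem.Chars.replace cs " ".toList "&nbsp;".toList) := by
      simp [Function.comp_def, PySem.Str.toList_replace]
    rw [hmap, PySem.Chars.join]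
    rw [show (" ".toList) = [' '] from rfl, show ("\n".toList) = ['\n'] from rfl]
    rw [splitOn_single, replace_single]
    have hrepl : ((List.splitOnP (· == '\n') text.toList).map
          (fun cs => PySem.Chars.replace cs [' '] "&nbsp;".toList))
        = (List.splitOnP (· == '\n') text.toList).map
            (·.flatMap (fun c => if c = ' ' then "&nbsp;".toList else [c])) := by
      simp only [List.map_inj_left]
      intro cs _
      exact replace_single cs ' ' _
    rw [hrepl, join_split_eq_flatMap, replace_single, flatMap_compose]
    apply List.flatMap_congr
    intro c _
    by_cases hc : c = ' '
    · subst hc; decide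
    · by_cases hn : c = '\n'
      · subst hn; simp
      · simp [hc, hn]
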